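-- pv_equiv track=rewrite | github.com/xu-kj/leetcode.python | interviews/2023_10_23 Meta Code Puzzle/l1q1/v1.py | getMaxAdditionalDinersCount
-- ===== SOURCE A (Python) =====
-- from typing import List
-- from math import ceil
--
-- def getMaxAdditionalDinersCount(N: int, K: int, M: int, S: List[int]) -> int:
--     available = 0
--     S_ = sorted(S)
--     for i in range(M - 1):
--         s1, s2 = S_[i], S_[i + 1]
--         available_ = max(0, s2 - s1 - 1 - 2 * K)
--         available += ceil(available_ / (K + 1))
--
--     # first
--     available_ = max(0, S_[0] - 1 - K)
--     available += ceil(available_ / (K + 1))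
--
--     # last
--     available_ = max(0, N - S_[-1] - K)
--     available += ceil(available_ / (K + 1))
--
--     return available
-- ===== SOURCE B (Python) =====
-- def getMaxAdditionalDinersCount(N, K, M, S):
--     den = K + 1
--     T = sorted(S)
--
--     def fit(length):
--         # diners fitting into a free stretch of `length` seats (exact integer ceiling)
--         return -(-max(0, length) // den)
--
--     def between(lo, hi):
--         # diners fitting between adjacent seats of T[lo..hi], by divide and conquer
--         if hi - lo < 1:
--             return 0
--         if hi - lo == 1:
--             return fit(T[hi] - T[lo] - 1 - 2 * K)
--         mid = (lo + hi) // 2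
--         return between(lo, mid) + between(mid, hi)
--
--     return fit(T[0] - 1 - K) + between(0, M - 1) + fit(N - T[-1] - K)
-- ===== Notes on version B (the rewrite author's own statement) =====
-- stated objective: alternative
-- what changed: A's left-to-right indexed for-loop over adjacent sorted-seat pairs plus two separate edge blocks, all via float math.ceil, become a divide-and-conquer recursion that splits the index range of the sorted seats at its midpoint, with a shared fit() helper using exact integer ceiling division.
import Mathlib
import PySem

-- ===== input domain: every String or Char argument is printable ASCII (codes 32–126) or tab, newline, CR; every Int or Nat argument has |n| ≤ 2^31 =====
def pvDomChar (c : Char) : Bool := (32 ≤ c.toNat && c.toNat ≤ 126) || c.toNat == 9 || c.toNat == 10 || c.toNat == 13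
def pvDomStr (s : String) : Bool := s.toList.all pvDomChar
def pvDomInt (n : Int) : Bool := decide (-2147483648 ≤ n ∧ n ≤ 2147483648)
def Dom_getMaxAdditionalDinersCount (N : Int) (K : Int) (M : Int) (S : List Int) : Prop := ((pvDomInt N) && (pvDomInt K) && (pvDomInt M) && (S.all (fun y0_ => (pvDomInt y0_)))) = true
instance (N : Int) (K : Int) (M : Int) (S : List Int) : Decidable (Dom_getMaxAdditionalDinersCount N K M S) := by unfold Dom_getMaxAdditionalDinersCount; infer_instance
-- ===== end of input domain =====

-- B replaces A's left-to-right indexed loop plus float math.ceil by a divide-and-conquer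
-- recursion over index ranges of the sorted seats with exact integer ceiling division (alternative).

-- Shared arithmetic: ceil(a / b). Python A computes math.ceil(a/(K+1)) through float
-- division, exact at the magnitudes Dom admits; Python B computes -((-a) // (K+1)).
def pvCeilDiv (a b : Int) : Int := -(PySem.Int.floordiv (-a) b)

-- ===== PORT A =====
def getMaxAdditionalDinersCount (N : Int) (K : Int) (M : Int) (S : List Int) : Int :=
  let S' := PySem.List.sorted S id false
  let available := (PySem.List.pyRange 0 (M - 1) 1).foldl
    (fun acc i =>
      let s1 := PySem.List.pyGetD S' i 0
      let s2 := PySem.List.pyGetD S' (i + 1) 0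
      acc + pvCeilDiv (max 0 (s2 - s1 - 1 - 2 * K)) (K + 1)) 0
  let available := available + pvCeilDiv (max 0 (PySem.List.pyGetD S' 0 0 - 1 - K)) (K + 1)
  available + pvCeilDiv (max 0 (N - PySem.List.pyGetD S' (-1) 0 - K)) (K + 1)

-- ===== PORT B =====
-- fit(length): diners fitting into a free stretch of `length` seats
def pvFit (K len : Int) : Int := pvCeilDiv (max 0 len) (K + 1)

-- termination helper for the midpoint split, cited by pvBetween's decreasing_by
theorem pvMid_lt (lo hi : Int) (h : 2 ≤ hi - lo) :
    (PySem.Int.floordiv (lo + hi) 2 - lo).toNat < (hi - lo).toNat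
      ∧ (hi - PySem.Int.floordiv (lo + hi) 2).toNat < (hi - lo).toNat := by
  have e : PySem.Int.floordiv (lo + hi) 2 = (lo + hi) / 2 := by
    simp [PySem.Int.floordiv, Int.fdiv_eq_ediv]
  rw [e]; omega

-- between(lo, hi): diners fitting between adjacent seats of T[lo..hi], divide and conquer
def pvBetween (K : Int) (T : List Int) (lo hi : Int) : Int :=
  if hi - lo < 1 then 0
  else if hi - lo = 1 then
    pvFit K (PySem.List.pyGetD T hi 0 - PySem.List.pyGetD T lo 0 - 1 - 2 * K)
  else
    pvBetween K T lo (PySem.Int.floordiv (lo + hi) 2)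
      + pvBetween K T (PySem.Int.floordiv (lo + hi) 2) hi
termination_by (hi - lo).toNat
decreasing_by
  · exact (pvMid_lt lo hi (by omega)).1
  · exact (pvMid_lt lo hi (by omega)).2

def getMaxAdditionalDinersCount_alt (N : Int) (K : Int) (M : Int) (S : List Int) : Int :=
  let T := PySem.List.sorted S id false
  pvFit K (PySem.List.pyGetD T 0 0 - 1 - K)
    + pvBetween K T 0 (M - 1)
    + pvFit K (N - PySem.List.pyGetD T (-1) 0 - K)

-- ===== PRECONDITION & SPEC =====
-- Exactly the inputs on which Python A returns: a nonempty seat list (else S_[0] raises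
-- IndexError), M ≤ len(S) (else the loop's S_[i+1] raises IndexError), K ≠ -1 (else
-- ZeroDivisionError).
def Pre_getMaxAdditionalDinersCount (N : Int) (K : Int) (M : Int) (S : List Int) : Prop :=
  S ≠ [] ∧ M ≤ (S.length : Int) ∧ K + 1 ≠ 0
instance (N : Int) (K : Int) (M : Int) (S : List Int) : Decidable (Pre_getMaxAdditionalDinersCount N K M S) := by unfold Pre_getMaxAdditionalDinersCount; infer_instance

def pvWitness_getMaxAdditionalDinersCount : Int × Int × Int × List Int := (10, 1, 2, [2, 6])

def Spec_getMaxAdditionalDinersCount (N : Int) (K : Int) (M : Int) (S : List Int) (out : Int) : Prop := out = getMaxAdditionalDinersCount_alt N K M S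
instance (N : Int) (K : Int) (M : Int) (S : List Int) (out : Int) : Decidable (Spec_getMaxAdditionalDinersCount N K M S out) := by unfold Spec_getMaxAdditionalDinersCount; infer_instance

-- ===== CLAIM (what is proved, stated in full; the proofs are below) =====
def Claim_equal_getMaxAdditionalDinersCount : Prop := ∀ (N : Int) (K : Int) (M : Int) (S : List Int), Dom_getMaxAdditionalDinersCount N K M S → Pre_getMaxAdditionalDinersCount N K M S → Spec_getMaxAdditionalDinersCount N K M S (getMaxAdditionalDinersCount N K M S)

-- ===== LEMMAS AND PROOFS =====

-- B's divide-and-conquer over [lo, hi] computes the sum of adjacent-pair terms over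
-- range(lo, hi) — exactly what A's loop accumulates.
theorem pvBetween_seg (K : Int) (T : List Int) :
    ∀ (n : Nat) (lo hi : Int), (hi - lo).toNat = n →
      pvBetween K T lo hi
        = ((PySem.List.pyRange lo hi 1).map
            (fun i => pvFit K (PySem.List.pyGetD T (i + 1) 0 - PySem.List.pyGetD T i 0 - 1 - 2 * K))).sum := by
  intro n
  induction n using Nat.strong_induction_on with
  | _ n ih =>
    intro lo hi hn
    rw [pvBetween]
    by_cases h1 : hi - lo < 1
    · rw [if_pos h1, PySem.List.pyRange_one_eq_nil (by omega)]
      simp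
    · rw [if_neg h1]
      by_cases h2 : hi - lo = 1
      · rw [if_pos h2]
        have e : hi = lo + 1 := by omega
        subst e
        rw [PySem.List.pyRange_one_singleton]
        simp
      · rw [if_neg h2]
        have hb := pvMid_lt lo hi (by omega)
        have e : PySem.Int.floordiv (lo + hi) 2 = (lo + hi) / 2 := by
          simp [PySem.Int.floordiv, Int.fdiv_eq_ediv]
        rw [e] at hb ⊢
        rw [PySem.List.pyRange_one_append lo ((lo + hi) / 2) hi (by omega) (by omega),
          List.map_append, List.sum_append,
          ih _ (by omega) lo ((lo + hi) / 2) rfl,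
          ih _ (by omega) ((lo + hi) / 2) hi rfl]

-- ===== VERDICT (by name: the statement is the Claim_ definition above) =====
theorem getMaxAdditionalDinersCount_spec : Claim_equal_getMaxAdditionalDinersCount := by
  intro N K M S _hDom _hPre
  unfold Spec_getMaxAdditionalDinersCount
  unfold getMaxAdditionalDinersCount getMaxAdditionalDinersCount_alt
  simp only []
  rw [PySem.List.foldl_add _ (fun i => pvCeilDiv (max 0 (PySem.List.pyGetD (PySem.List.sorted S id false) (i + 1) 0 - PySem.List.pyGetD (PySem.List.sorted S id false) i 0 - 1 - 2 * K)) (K + 1)) 0]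
  rw [pvBetween_seg K (PySem.List.sorted S id false) (M - 1 - 0).toNat 0 (M - 1) (by omega)]
  simp only [pvFit]
  ring
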